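-- pv_equiv track=rewrite | github.com/AghilesAzzoug/Table_data_generation | TableGeneration/tools.py | get_coords_for_rows
-- ===== SOURCE A (Python) =====
-- def get_coords_for_rows(cells_in_rows, cells_bboxes):
--
--     bboxes = []
--
--     very_min_x = 999999
--     very_max_x = 0
--
--     for current_cells_in_rows in cells_in_rows:
--         x_min = 999999
--         y_min = 999999
--         x_max = 0
--         y_max = 0
--
--         # [lentext,txt,xmin,ymin,xmax,ymax]
--         for cell_id, cell_bbox in enumerate(cells_bboxes):
--             if cell_id in current_cells_in_rows:
--                 x_min = min(x_min, cell_bbox[2])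
--                 y_min = min(y_min, cell_bbox[3])
--
--                 x_max = max(x_max, cell_bbox[4])
--                 y_max = max(y_max, cell_bbox[5])
--
--                 very_min_x = min(x_min, very_min_x)
--                 very_max_x = max(x_max, very_max_x)
--
--         bboxes.append([x_min, y_min, x_max, y_max])
--
--     bboxes_ = []
--
--     for box in bboxes:
--         box[0] = very_min_x
--         box[2] = very_max_x
--
--         bboxes_.append(box)
--
--     return bboxes_
-- ===== SOURCE B (Python) =====
-- def get_coords_for_rows(cells_in_rows, cells_bboxes):
--     n = len(cells_bboxes)
--     stats = []
--     for row in cells_in_rows: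
--         x_min = y_min = 999999
--         x_max = y_max = 0
--         for i in row:
--             if 0 <= i < n:
--                 b = cells_bboxes[i]
--                 x_min = min(x_min, b[2])
--                 y_min = min(y_min, b[3])
--                 x_max = max(x_max, b[4])
--                 y_max = max(y_max, b[5])
--         stats.append((x_min, y_min, x_max, y_max))
--     gx_min = 999999
--     gx_max = 0
--     for s in stats:
--         gx_min = min(gx_min, s[0])
--         gx_max = max(gx_max, s[2])
--     return [[gx_min, s[1], gx_max, s[3]] for s in stats]
-- ===== Notes on version B (the rewrite author's own statement) =====
-- stated objective: faster
-- what changed: B iterates only over the cell ids listed in each row (bounds-checked direct indexing) instead of scanning every bbox per row with a linear membership test, and derives the global x extents in one pass over the per-row stats.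
import Mathlib
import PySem

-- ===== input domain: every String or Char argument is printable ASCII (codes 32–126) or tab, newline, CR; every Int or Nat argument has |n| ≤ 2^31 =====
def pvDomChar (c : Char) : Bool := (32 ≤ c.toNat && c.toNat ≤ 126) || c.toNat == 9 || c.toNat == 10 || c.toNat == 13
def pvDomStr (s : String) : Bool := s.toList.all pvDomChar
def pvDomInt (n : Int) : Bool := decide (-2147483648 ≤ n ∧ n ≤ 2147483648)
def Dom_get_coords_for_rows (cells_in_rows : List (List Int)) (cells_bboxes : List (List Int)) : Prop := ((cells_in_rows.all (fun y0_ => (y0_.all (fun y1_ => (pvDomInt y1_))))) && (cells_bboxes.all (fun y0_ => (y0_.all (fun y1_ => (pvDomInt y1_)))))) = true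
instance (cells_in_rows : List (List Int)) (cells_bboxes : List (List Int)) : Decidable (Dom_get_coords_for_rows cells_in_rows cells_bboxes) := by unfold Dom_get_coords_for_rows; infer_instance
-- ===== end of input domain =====

-- B replaces A's per-row scan over ALL bboxes (with a linear membership test) by a direct
-- bounds-checked walk over the ids listed in each row, plus one pass for the global x extents:
-- objective = faster (asymptotically fewer operations for large bbox lists).

-- ===== PORT A =====
-- inner loop body: for cell_id, cell_bbox in enumerate(cells_bboxes): if cell_id in current_cells_in_rows: …
-- state = (x_min, y_min, x_max, y_max, very_min_x, very_max_x)
def pvACell (row : List Int) (t : Int × Int × Int × Int × Int × Int) (p : Int × List Int) :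
    Int × Int × Int × Int × Int × Int :=
  if p.1 ∈ row then
    let x_min := min t.1 (PySem.List.pyGetD p.2 2 0)
    let y_min := min t.2.1 (PySem.List.pyGetD p.2 3 0)
    let x_max := max t.2.2.1 (PySem.List.pyGetD p.2 4 0)
    let y_max := max t.2.2.2.1 (PySem.List.pyGetD p.2 5 0)
    (x_min, y_min, x_max, y_max, min x_min t.2.2.2.2.1, max x_max t.2.2.2.2.2)
  else t

-- outer loop body: one row; state = (bboxes, very_min_x, very_max_x)
def pvARowStep (cells_bboxes : List (List Int)) (acc : List (List Int) × Int × Int)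
    (row : List Int) : List (List Int) × Int × Int :=
  let s := (PySem.List.enumerate cells_bboxes).foldl (pvACell row) (999999, 999999, 0, 0, acc.2.1, acc.2.2)
  (acc.1 ++ [[s.1, s.2.1, s.2.2.1, s.2.2.2.1]], s.2.2.2.2.1, s.2.2.2.2.2)

def get_coords_for_rows (cells_in_rows : List (List Int)) (cells_bboxes : List (List Int)) : List (List Int) :=
  let r := cells_in_rows.foldl (pvARowStep cells_bboxes) ([], 999999, 0)
  -- second loop: box[0] = very_min_x; box[2] = very_max_x; bboxes_.append(box)
  r.1.foldl (fun acc box => acc ++ [PySem.List.pySetD (PySem.List.pySetD box 0 r.2.1) 2 r.2.2]) []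

-- ===== PORT B =====
-- inner loop body of B: for i in row: if 0 <= i < n: update mins/maxes from cells_bboxes[i]
def pvBCell (cbb : List (List Int)) (t : Int × Int × Int × Int) (i : Int) : Int × Int × Int × Int :=
  if 0 ≤ i ∧ i < (cbb.length : Int) then
    let b := PySem.List.pyGetD cbb i []
    (min t.1 (PySem.List.pyGetD b 2 0), min t.2.1 (PySem.List.pyGetD b 3 0),
     max t.2.2.1 (PySem.List.pyGetD b 4 0), max t.2.2.2 (PySem.List.pyGetD b 5 0))
  else t

def get_coords_for_rows_alt (cells_in_rows : List (List Int)) (cells_bboxes : List (List Int)) : List (List Int) :=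
  let stats := cells_in_rows.map (fun row => row.foldl (pvBCell cells_bboxes) (999999, 999999, 0, 0))
  let gmin := stats.foldl (fun a s => min a s.1) 999999
  let gmax := stats.foldl (fun a s => max a s.2.2.1) 0
  stats.map (fun s => [gmin, s.2.1, gmax, s.2.2.2])

-- ===== PRECONDITION & SPEC =====
-- Pre_ excludes exactly the inputs on which Python A raises IndexError: some row contains the id of
-- a bbox (an in-range index) whose list is shorter than 6, so cell_bbox[2..5] fails.
def Pre_get_coords_for_rows (cells_in_rows : List (List Int)) (cells_bboxes : List (List Int)) : Prop :=
  ∀ row ∈ cells_in_rows, ∀ p ∈ PySem.List.enumerate cells_bboxes, p.1 ∈ row → 6 ≤ p.2.length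
instance (cells_in_rows : List (List Int)) (cells_bboxes : List (List Int)) : Decidable (Pre_get_coords_for_rows cells_in_rows cells_bboxes) := by unfold Pre_get_coords_for_rows; infer_instance
def pvWitness_get_coords_for_rows : List (List Int) × List (List Int) :=
  ([[0], [1, 0]], [[9, 9, 1, 2, 3, 4], [9, 9, 0, 5, 6, 7]])

def Spec_get_coords_for_rows (cells_in_rows : List (List Int)) (cells_bboxes : List (List Int)) (out : List (List Int)) : Prop := out = get_coords_for_rows_alt cells_in_rows cells_bboxes
instance (cells_in_rows : List (List Int)) (cells_bboxes : List (List Int)) (out : List (List Int)) : Decidable (Spec_get_coords_for_rows cells_in_rows cells_bboxes out) := by unfold Spec_get_coords_for_rows; infer_instance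

-- ===== CLAIM (what is proved, stated in full; the proofs are below) =====
def Claim_equal_get_coords_for_rows : Prop := ∀ (cells_in_rows : List (List Int)) (cells_bboxes : List (List Int)), Dom_get_coords_for_rows cells_in_rows cells_bboxes → Pre_get_coords_for_rows cells_in_rows cells_bboxes → Spec_get_coords_for_rows cells_in_rows cells_bboxes (get_coords_for_rows cells_in_rows cells_bboxes)

-- ===== LEMMAS AND PROOFS =====

-- the shared per-index quadruple update (proof vocabulary only)
def pvQ (cbb : List (List Int)) (t : Int × Int × Int × Int) (i : Int) : Int × Int × Int × Int :=
  let b := PySem.List.pyGetD cbb i []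
  (min t.1 (PySem.List.pyGetD b 2 0), min t.2.1 (PySem.List.pyGetD b 3 0),
   max t.2.2.1 (PySem.List.pyGetD b 4 0), max t.2.2.2 (PySem.List.pyGetD b 5 0))

-- B's row fold is the fold of pvQ over the ids of the row that are in range
theorem pvB_filter (cbb : List (List Int)) (l : List Int) (t : Int × Int × Int × Int) :
    l.foldl (pvBCell cbb) t
      = (l.filter (fun i => decide (0 ≤ i ∧ i < (cbb.length : Int)))).foldl (pvQ cbb) t := by
  induction l generalizing t with
  | nil => rfl
  | cons x xs ih =>
      by_cases h : 0 ≤ x ∧ x < (cbb.length : Int) <;>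
        simp [pvBCell, pvQ, h, ih]

-- generic if-fold = filtered fold (for A's membership test)
theorem pvA_filter (cbb : List (List Int)) (row : List Int) (l : List Int)
    (t : Int × Int × Int × Int) :
    l.foldl (fun t j => if j ∈ row then pvQ cbb t j else t) t
      = (l.filter (fun j => decide (j ∈ row))).foldl (pvQ cbb) t := by
  induction l generalizing t with
  | nil => rfl
  | cons x xs ih =>
      by_cases h : x ∈ row <;> simp [h, ih]

-- the fold of pvQ splits into four independent min/max folds
theorem pvQ_split (cbb : List (List Int)) (l : List Int) (t : Int × Int × Int × Int) :
    l.foldl (pvQ cbb) t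
      = (l.foldl (fun a i => min a (PySem.List.pyGetD (PySem.List.pyGetD cbb i []) 2 0)) t.1,
         l.foldl (fun a i => min a (PySem.List.pyGetD (PySem.List.pyGetD cbb i []) 3 0)) t.2.1,
         l.foldl (fun a i => max a (PySem.List.pyGetD (PySem.List.pyGetD cbb i []) 4 0)) t.2.2.1,
         l.foldl (fun a i => max a (PySem.List.pyGetD (PySem.List.pyGetD cbb i []) 5 0)) t.2.2.2) := by
  induction l generalizing t with
  | nil => rfl
  | cons x xs ih => simp [pvQ, ih]

-- keyed min-fold: bounds and membership-only dependence
theorem pv_minfold_le_init (g : Int → Int) (l : List Int) (s : Int) :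
    l.foldl (fun a i => min a (g i)) s ≤ s := by
  induction l generalizing s with
  | nil => exact le_refl s
  | cons x xs ih => exact le_trans (ih _) (min_le_left _ _)

theorem pv_minfold_le_mem (g : Int → Int) (x : Int) :
    ∀ (l : List Int), x ∈ l → ∀ (s : Int), l.foldl (fun a i => min a (g i)) s ≤ g x := by
  intro l
  induction l with
  | nil => intro hx; cases hx
  | cons y ys ih =>
      intro hx s
      rcases List.mem_cons.mp hx with h | h
      · subst h; exact le_trans (pv_minfold_le_init g ys _) (min_le_right _ _)
      · exact ih h _

theorem pv_le_minfold (g : Int → Int) (c : Int) :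
    ∀ (l : List Int) (s : Int), c ≤ s → (∀ x ∈ l, c ≤ g x) →
    c ≤ l.foldl (fun a i => min a (g i)) s := by
  intro l
  induction l with
  | nil => intro s hs _; exact hs
  | cons y ys ih =>
      intro s hs h
      exact ih _ (le_min hs (h y List.mem_cons_self))
        (fun x hx => h x (List.mem_cons_of_mem _ hx))

theorem pv_minfold_congr (g : Int → Int) (l1 l2 : List Int) (s : Int)
    (h : ∀ x, x ∈ l1 ↔ x ∈ l2) :
    l1.foldl (fun a i => min a (g i)) s = l2.foldl (fun a i => min a (g i)) s := by
  apply le_antisymm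
  · exact pv_le_minfold g _ l2 s (pv_minfold_le_init g l1 s)
      (fun x hx => pv_minfold_le_mem g x l1 ((h x).mpr hx) s)
  · exact pv_le_minfold g _ l1 s (pv_minfold_le_init g l2 s)
      (fun x hx => pv_minfold_le_mem g x l2 ((h x).mp hx) s)

theorem pv_maxfold_init_le (g : Int → Int) (l : List Int) (s : Int) :
    s ≤ l.foldl (fun a i => max a (g i)) s := by
  induction l generalizing s with
  | nil => exact le_refl s
  | cons x xs ih => exact le_trans (le_max_left _ _) (ih _)

theorem pv_maxfold_mem_le (g : Int → Int) (x : Int) :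
    ∀ (l : List Int), x ∈ l → ∀ (s : Int), g x ≤ l.foldl (fun a i => max a (g i)) s := by
  intro l
  induction l with
  | nil => intro hx; cases hx
  | cons y ys ih =>
      intro hx s
      rcases List.mem_cons.mp hx with h | h
      · subst h; exact le_trans (le_max_right _ _) (pv_maxfold_init_le g ys _)
      · exact ih h _

theorem pv_maxfold_le (g : Int → Int) (c : Int) :
    ∀ (l : List Int) (s : Int), s ≤ c → (∀ x ∈ l, g x ≤ c) →
    l.foldl (fun a i => max a (g i)) s ≤ c := by
  intro l
  induction l with
  | nil => intro s hs _; exact hs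
  | cons y ys ih =>
      intro s hs h
      exact ih _ (max_le hs (h y List.mem_cons_self))
        (fun x hx => h x (List.mem_cons_of_mem _ hx))

theorem pv_maxfold_congr (g : Int → Int) (l1 l2 : List Int) (s : Int)
    (h : ∀ x, x ∈ l1 ↔ x ∈ l2) :
    l1.foldl (fun a i => max a (g i)) s = l2.foldl (fun a i => max a (g i)) s := by
  apply le_antisymm
  · exact pv_maxfold_le g _ l1 s (pv_maxfold_init_le g l2 s)
      (fun x hx => pv_maxfold_mem_le g x l2 ((h x).mp hx) s)
  · exact pv_maxfold_le g _ l2 s (pv_maxfold_init_le g l1 s)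
      (fun x hx => pv_maxfold_mem_le g x l1 ((h x).mpr hx) s)

-- the two index lists have the same members
theorem pv_index_sets (cbb : List (List Int)) (row : List Int) (j : Int) :
    (j ∈ (PySem.List.pyRange 0 (cbb.length : Int) 1).filter (fun j => decide (j ∈ row)))
      ↔ j ∈ row.filter (fun i => decide (0 ≤ i ∧ i < (cbb.length : Int))) := by
  simp [List.mem_filter, PySem.List.mem_pyRange_one]
  tauto

-- same-member index lists give the same pvQ fold
theorem pvQ_congr (cbb : List (List Int)) (l1 l2 : List Int) (t : Int × Int × Int × Int)
    (h : ∀ x, x ∈ l1 ↔ x ∈ l2) :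
    l1.foldl (pvQ cbb) t = l2.foldl (pvQ cbb) t := by
  rw [pvQ_split, pvQ_split]
  rw [pv_minfold_congr _ l1 l2 _ h, pv_minfold_congr _ l1 l2 _ h,
      pv_maxfold_congr _ l1 l2 _ h, pv_maxfold_congr _ l1 l2 _ h]

-- B's per-row quadruple
def pvRowQ (cbb : List (List Int)) (row : List Int) : Int × Int × Int × Int :=
  row.foldl (pvBCell cbb) (999999, 999999, 0, 0)

-- monotone bounds of the if-guarded pvQ fold
theorem pvQ_if_mono (cbb : List (List Int)) (row : List Int) (l : List Int)
    (t : Int × Int × Int × Int) :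
    (l.foldl (fun t j => if j ∈ row then pvQ cbb t j else t) t).1 ≤ t.1
    ∧ t.2.2.1 ≤ (l.foldl (fun t j => if j ∈ row then pvQ cbb t j else t) t).2.2.1 := by
  induction l generalizing t with
  | nil => exact ⟨le_refl _, le_refl _⟩
  | cons x xs ih =>
      by_cases h : x ∈ row
      · simp only [List.foldl_cons, h, if_pos]
        refine ⟨le_trans (ih _).1 ?_, le_trans ?_ (ih _).2⟩
        · exact min_le_left _ _
        · exact le_max_left _ _
      · simpa [h] using ih t

-- A's six-state inner fold collapses to the quadruple fold plus the global-x recurrences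
theorem pvA_collapse (cbb : List (List Int)) (row : List Int) (l : List Int) :
    ∀ x y X Y v V, v ≤ x → X ≤ V →
    l.foldl (fun t j => pvACell row t (j, PySem.List.pyGetD cbb j [])) (x, y, X, Y, v, V)
      = (let q := l.foldl (fun t j => if j ∈ row then pvQ cbb t j else t) (x, y, X, Y)
         (q.1, q.2.1, q.2.2.1, q.2.2.2, min v q.1, max V q.2.2.1)) := by
  induction l with
  | nil =>
      intro x y X Y v V hv hV
      simp only [List.foldl_nil]
      have h1 : min v x = v := min_eq_left hv
      have h2 : max V X = V := max_eq_left hV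
      simp [h1, h2]
  | cons j js ih =>
      intro x y X Y v V hv hV
      by_cases h : j ∈ row
      · have hstep :
            pvACell row (x, y, X, Y, v, V) (j, PySem.List.pyGetD cbb j [])
              = (min x (PySem.List.pyGetD (PySem.List.pyGetD cbb j []) 2 0),
                 min y (PySem.List.pyGetD (PySem.List.pyGetD cbb j []) 3 0),
                 max X (PySem.List.pyGetD (PySem.List.pyGetD cbb j []) 4 0),
                 max Y (PySem.List.pyGetD (PySem.List.pyGetD cbb j []) 5 0),
                 min (min x (PySem.List.pyGetD (PySem.List.pyGetD cbb j []) 2 0)) v,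
                 max (max X (PySem.List.pyGetD (PySem.List.pyGetD cbb j []) 4 0)) V) := by
          simp [pvACell, h]
        simp only [List.foldl_cons, hstep]
        rw [ih _ _ _ _ _ _ (min_le_left _ _) (le_max_left _ _)]
        obtain ⟨hm1, hm2⟩ := pvQ_if_mono cbb row js
          (min x (PySem.List.pyGetD (PySem.List.pyGetD cbb j []) 2 0),
           min y (PySem.List.pyGetD (PySem.List.pyGetD cbb j []) 3 0),
           max X (PySem.List.pyGetD (PySem.List.pyGetD cbb j []) 4 0),
           max Y (PySem.List.pyGetD (PySem.List.pyGetD cbb j []) 5 0))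
        simp only [pvQ] at hm1 hm2
        simp only [if_pos h, pvQ, Prod.mk.injEq]
        refine ⟨trivial, trivial, trivial, trivial, ?_, ?_⟩ <;> omega
      · simp only [List.foldl_cons, h]
        have hstep : pvACell row (x, y, X, Y, v, V) (j, PySem.List.pyGetD cbb j []) = (x, y, X, Y, v, V) := by
          simp [pvACell, h]
        rw [hstep, ih _ _ _ _ _ _ hv hV]
        simp

-- A's whole inner loop (over enumerate) equals B's row quadruple with the global-x recurrences
theorem pvA_row (cbb : List (List Int)) (row : List Int) (v V : Int)
    (hv : v ≤ 999999) (hV : 0 ≤ V) :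
    (PySem.List.enumerate cbb).foldl (pvACell row) (999999, 999999, 0, 0, v, V)
      = ((pvRowQ cbb row).1, (pvRowQ cbb row).2.1, (pvRowQ cbb row).2.2.1, (pvRowQ cbb row).2.2.2,
         min v (pvRowQ cbb row).1, max V (pvRowQ cbb row).2.2.1) := by
  rw [PySem.List.enumerate_eq_map_pyRange cbb ([] : List Int)]
  simp only [List.foldl_map, PySem.List.len_eq]
  rw [pvA_collapse cbb row (PySem.List.pyRange 0 (cbb.length : Int) 1) 999999 999999 0 0 v V hv hV]
  have hq : (PySem.List.pyRange 0 (cbb.length : Int) 1).foldl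
      (fun t j => if j ∈ row then pvQ cbb t j else t) (999999, 999999, 0, 0) = pvRowQ cbb row := by
    rw [pvA_filter, pvRowQ, pvB_filter]
    exact pvQ_congr cbb _ _ _ (pv_index_sets cbb row)
  simp only [hq]

-- A's outer loop in closed form
theorem pvA_outer (cbb : List (List Int)) (rows : List (List Int)) :
    ∀ (bxs : List (List Int)) (v V : Int), v ≤ 999999 → 0 ≤ V →
    rows.foldl (pvARowStep cbb) (bxs, v, V)
      = (bxs ++ rows.map (fun row =>
            [(pvRowQ cbb row).1, (pvRowQ cbb row).2.1, (pvRowQ cbb row).2.2.1, (pvRowQ cbb row).2.2.2]),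
         rows.foldl (fun a row => min a (pvRowQ cbb row).1) v,
         rows.foldl (fun a row => max a (pvRowQ cbb row).2.2.1) V) := by
  induction rows with
  | nil => intro bxs v V hv hV; simp
  | cons row rest ih =>
      intro bxs v V hv hV
      simp only [List.foldl_cons, List.map_cons]
      have hstep : pvARowStep cbb (bxs, v, V) row
          = (bxs ++ [[(pvRowQ cbb row).1, (pvRowQ cbb row).2.1, (pvRowQ cbb row).2.2.1, (pvRowQ cbb row).2.2.2]],
             min v (pvRowQ cbb row).1, max V (pvRowQ cbb row).2.2.1) := by
        simp only [pvARowStep, pvA_row cbb row v V hv hV]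
      rw [hstep, ih _ _ _ (le_trans (min_le_left _ _) hv) (le_trans hV (le_max_left _ _))]
      simp

-- ===== VERDICT (by name: the statement is the Claim_ definition above) =====
theorem get_coords_for_rows_spec : Claim_equal_get_coords_for_rows := by
  intro cir cbb _ _
  unfold Spec_get_coords_for_rows get_coords_for_rows get_coords_for_rows_alt
  rw [pvA_outer cbb cir [] 999999 0 (le_refl _) (le_refl _)]
  simp only [List.nil_append]
  rw [PySem.List.foldl_append_singleton_eq_map, List.map_map, List.map_map]
  simp only [List.foldl_map, pvRowQ]
  apply List.map_congr_left
  intro row _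
  simp [PySem.List.pySetD, PySem.List.pySet?, PySem.List.pyIdx?]
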